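-- pv_equiv track=rewrite | github.com/bstrb/dynamicity | ici/v3/filter_and_sample.py | coalesce_indices
-- ===== SOURCE A (Python) =====
-- def coalesce_indices(sorted_idx):
--     """[(start, end)] half-open ranges covering sorted indices (ascending)."""
--     if len(sorted_idx) == 0:
--         return []
--     ranges = []
--     s = sorted_idx[0]
--     prev = s
--     for x in sorted_idx[1:]:
--         if x == prev + 1:
--             prev = x
--         else:
--             ranges.append((s, prev + 1))
--             s = x
--             prev = x
--     ranges.append((s, prev + 1))
--     return ranges
-- ===== SOURCE B (Python) =====
-- def coalesce_indices(sorted_idx):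
--     """[(start, end)] half-open ranges covering sorted indices (ascending)."""
--     res = []  # built in reverse order
--     for x in reversed(sorted_idx):
--         if res and x + 1 == res[-1][0]:
--             res[-1] = (x, res[-1][1])
--         else:
--             res.append((x, x + 1))
--     res.reverse()
--     return res
-- ===== Notes on version B (the rewrite author's own statement) =====
-- stated objective: alternative
-- what changed: Replaces A's forward scan carrying a (ranges, current-start, prev) state triple with a backward single pass that merges each element into the most recent range of the result (or starts a new one), so no run state is threaded at all.
import Mathlib
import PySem

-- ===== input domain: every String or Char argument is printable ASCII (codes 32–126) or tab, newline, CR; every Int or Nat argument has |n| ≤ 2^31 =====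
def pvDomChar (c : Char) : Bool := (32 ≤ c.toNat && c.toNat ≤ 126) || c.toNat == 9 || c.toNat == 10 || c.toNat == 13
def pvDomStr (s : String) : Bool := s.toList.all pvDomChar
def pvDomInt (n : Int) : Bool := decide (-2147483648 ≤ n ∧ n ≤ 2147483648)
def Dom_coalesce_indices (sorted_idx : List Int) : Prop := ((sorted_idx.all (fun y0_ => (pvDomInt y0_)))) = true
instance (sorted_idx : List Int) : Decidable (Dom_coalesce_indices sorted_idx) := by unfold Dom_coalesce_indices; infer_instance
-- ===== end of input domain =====

-- B re-decomposes A's forward scan with (ranges, s, prev) state into a backward pass that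
-- merges each element into the front of the result list (objective: alternative, same cost).


-- ===== PORT A =====
-- literal port of A: fold over the tail carrying (ranges, s, prev), then the final append
def pvStepA (acc : List (Int × Int) × Int × Int) (x : Int) : List (Int × Int) × Int × Int :=
  if x = acc.2.2 + 1 then (acc.1, acc.2.1, x)
  else (acc.1 ++ [(acc.2.1, acc.2.2 + 1)], x, x)

def coalesce_indices (sorted_idx : List Int) : List (Int × Int) :=
  match sorted_idx with
  | [] => []
  | s0 :: rest =>
    let st := rest.foldl pvStepA ([], s0, s0)
    st.1 ++ [(st.2.1, st.2.2 + 1)]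

-- ===== PORT B =====
-- one step of B's backward pass over the reverse-ordered result list:
-- merge x into its last range (res[-1]) or append a new one
def pvStepRev (res : List (Int × Int)) (x : Int) : List (Int × Int) :=
  match res.getLast? with
  | some (s, e) => if x + 1 = s then res.dropLast ++ [(x, e)] else res ++ [(x, x + 1)]
  | none => res ++ [(x, x + 1)]

-- literal port of B: iterate over reversed(sorted_idx) building res in reverse, then reverse it
def coalesce_indices_alt (sorted_idx : List Int) : List (Int × Int) :=
  (sorted_idx.reverse.foldl pvStepRev []).reverse

-- ===== PRECONDITION & SPEC =====
def Spec_coalesce_indices (sorted_idx : List Int) (out : List (Int × Int)) : Prop := out = coalesce_indices_alt sorted_idx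
instance (sorted_idx : List Int) (out : List (Int × Int)) : Decidable (Spec_coalesce_indices sorted_idx out) := by unfold Spec_coalesce_indices; infer_instance

-- ===== CLAIM (what is proved, stated in full; the proofs are below) =====
def Claim_equal_coalesce_indices : Prop := ∀ (sorted_idx : List Int), Dom_coalesce_indices sorted_idx → Spec_coalesce_indices sorted_idx (coalesce_indices sorted_idx)

-- ===== LEMMAS AND PROOFS =====

-- B's step, seen on the un-reversed result: merge at the front / cons a fresh range
def pvStepB (x : Int) (res : List (Int × Int)) : List (Int × Int) :=
  match res with
  | (s, e) :: rs => if x + 1 = s then (x, e) :: rs else (x, x + 1) :: (s, e) :: rs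
  | [] => [(x, x + 1)]

lemma stepRev_reverse (r : List (Int × Int)) (x : Int) :
    pvStepRev r.reverse x = (pvStepB x r).reverse := by
  cases r with
  | nil => rfl
  | cons p rs =>
    obtain ⟨s, e⟩ := p
    simp only [pvStepRev, pvStepB, List.reverse_cons, List.getLast?_concat,
      List.dropLast_concat]
    by_cases h : x + 1 = s
    · simp [h]
    · simp [h]

lemma foldl_stepRev_reverse (l : List Int) (r : List (Int × Int)) :
    l.foldl pvStepRev r.reverse = (l.foldl (fun a x => pvStepB x a) r).reverse := by
  induction l generalizing r with
  | nil => rfl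
  | cons x xs ih => simp only [List.foldl_cons, stepRev_reverse, ih]

lemma altB_eq_foldr (xs : List Int) :
    coalesce_indices_alt xs = xs.foldr pvStepB [] := by
  unfold coalesce_indices_alt
  have h := foldl_stepRev_reverse xs.reverse ([] : List (Int × Int))
  rw [List.reverse_nil] at h
  rw [h, List.reverse_reverse, List.foldl_reverse]

-- A's loop rewritten as a structural recursion (no accumulator), for reasoning only
def pvLoopA (s prev : Int) : List Int → List (Int × Int)
  | [] => [(s, prev + 1)]
  | x :: xs => if x = prev + 1 then pvLoopA s x xs else (s, prev + 1) :: pvLoopA x x xs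

-- merging a new leading run (start s, last element prev) into an already-built result
def pvPrepend (s prev : Int) (res : List (Int × Int)) : List (Int × Int) :=
  match res with
  | (s', e') :: rs => if s' = prev + 1 then (s, e') :: rs else (s, prev + 1) :: (s', e') :: rs
  | [] => [(s, prev + 1)]

lemma foldlA_eq_loop (rest : List Int) (ranges : List (Int × Int)) (s prev : Int) :
    (rest.foldl pvStepA (ranges, s, prev)).1
      ++ [((rest.foldl pvStepA (ranges, s, prev)).2.1,
           (rest.foldl pvStepA (ranges, s, prev)).2.2 + 1)]
      = ranges ++ pvLoopA s prev rest := by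
  induction rest generalizing ranges s prev with
  | nil => simp [pvLoopA]
  | cons x xs ih =>
    simp only [List.foldl_cons, pvLoopA]
    by_cases h : x = prev + 1
    · simp [pvStepA, h, ih]
    · simp [pvStepA, h, ih, List.append_assoc]

lemma stepB_eq_prepend (x : Int) (res : List (Int × Int)) :
    pvStepB x res = pvPrepend x x res := by
  cases res with
  | nil => rfl
  | cons p rs =>
    obtain ⟨s', e'⟩ := p
    simp only [pvStepB, pvPrepend]
    by_cases h : x + 1 = s'
    · rw [if_pos h, if_pos h.symm]
    · rw [if_neg h, if_neg (fun hc => h hc.symm)]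

lemma stepB_head_fst (x : Int) (res : List (Int × Int)) :
    ∃ e rs, pvStepB x res = (x, e) :: rs := by
  cases res with
  | nil => exact ⟨x + 1, [], rfl⟩
  | cons p rs =>
    obtain ⟨s', e'⟩ := p
    by_cases h : x + 1 = s'
    · exact ⟨e', rs, by simp [pvStepB, h]⟩
    · exact ⟨x + 1, (s', e') :: rs, by simp [pvStepB, h]⟩

lemma prepend_stepB_merge (s prev x : Int) (r : List (Int × Int)) (h : x = prev + 1) :
    pvPrepend s prev (pvStepB x r) = pvPrepend s x r := by
  subst h
  cases r with
  | nil => simp [pvStepB, pvPrepend]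
  | cons p rs =>
    obtain ⟨s', e'⟩ := p
    by_cases h2 : prev + 1 + 1 = s'
    · simp only [pvStepB, if_pos h2, pvPrepend]
      rw [if_pos trivial, if_pos h2.symm]
    · simp only [pvStepB, if_neg h2, pvPrepend]
      rw [if_pos trivial, if_neg (fun hc => h2 hc.symm)]

lemma prepend_stepB_break (s prev x : Int) (r : List (Int × Int)) (h : ¬ x = prev + 1) :
    pvPrepend s prev (pvStepB x r) = (s, prev + 1) :: pvStepB x r := by
  obtain ⟨e, rs, hs⟩ := stepB_head_fst x r
  rw [hs]
  simp [pvPrepend, h]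

lemma loopA_eq_prepend_foldr (xs : List Int) (s prev : Int) :
    pvLoopA s prev xs = pvPrepend s prev (xs.foldr pvStepB []) := by
  induction xs generalizing s prev with
  | nil => rfl
  | cons x xs ih =>
    simp only [pvLoopA, List.foldr_cons]
    by_cases h : x = prev + 1
    · rw [if_pos h, ih, ← prepend_stepB_merge _ _ _ _ h]
    · rw [if_neg h, ih, ← stepB_eq_prepend, prepend_stepB_break _ _ _ _ h]

-- ===== VERDICT (by name: the statement is the Claim_ definition above) =====
theorem coalesce_indices_spec : Claim_equal_coalesce_indices := by
  intro sorted_idx _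
  unfold Spec_coalesce_indices
  rw [altB_eq_foldr]
  cases sorted_idx with
  | nil => rfl
  | cons s0 rest =>
    unfold coalesce_indices
    rw [List.foldr_cons, stepB_eq_prepend, ← loopA_eq_prepend_foldr]
    exact foldlA_eq_loop rest [] s0 s0
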